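-- pv_equiv track=rewrite | github.com/HeoSeokYong/AlgorithmStudy | Math/hongjun.py | solution
-- ===== SOURCE A (Python) =====
-- from typing import List
--
-- def solution(N: int, students: List[int]) -> int:
--     result = 0
--     MAXD = max(students)
--     participant = [0 for _ in range(MAXD + 1)]
--
--     for stud in students:
--         participant[stud] += 1
--
--     for i in range(1, MAXD + 1): # i: 팀원의 수
--         cnt = 0
--         # 학생의 수가 i에 배수인 경우를 cnt에 카운트
--         for j in range(1, MAXD // i + 1):
--             cnt += participant[i*j]
--
--         if cnt >= 2: # 참가팀이 2팀 이상인 경우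
--             result = max(result, i * cnt)
--
--     return result
-- ===== SOURCE B (Python) =====
-- def solution(N, students):
--     MAXD = max(students)
--     freq = {}
--     for s in students:
--         freq[s] = freq.get(s, 0) + 1
--     count = [0] * (MAXD + 1)
--     for v, c in freq.items():
--         d = 1
--         while d * d <= v:
--             if v % d == 0:
--                 count[d] += c
--                 q = v // d
--                 if q != d:
--                     count[q] += c
--             d += 1
--     result = 0
--     for d in range(1, MAXD + 1):
--         if count[d] >= 2:
--             result = max(result, d * count[d])
--     return result
-- ===== Notes on version B (the rewrite author's own statement) =====
-- stated objective: alternative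
-- what changed: A builds a participant array and, for every team size i, scans all multiples i, 2i, ... of i (harmonic sieve); B builds a frequency dict of the distinct student values and inverts the traversal: for each distinct value it enumerates its divisors by trial division up to sqrt(v), accumulating into a divisor-count array, then takes the same final max scan.
-- outside the precondition, e.g. on solution(1, [2, 2, -1]): A returns 6, B returns 4; on solution(0, [-1]): A raises IndexError, B returns 0
import Mathlib
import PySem

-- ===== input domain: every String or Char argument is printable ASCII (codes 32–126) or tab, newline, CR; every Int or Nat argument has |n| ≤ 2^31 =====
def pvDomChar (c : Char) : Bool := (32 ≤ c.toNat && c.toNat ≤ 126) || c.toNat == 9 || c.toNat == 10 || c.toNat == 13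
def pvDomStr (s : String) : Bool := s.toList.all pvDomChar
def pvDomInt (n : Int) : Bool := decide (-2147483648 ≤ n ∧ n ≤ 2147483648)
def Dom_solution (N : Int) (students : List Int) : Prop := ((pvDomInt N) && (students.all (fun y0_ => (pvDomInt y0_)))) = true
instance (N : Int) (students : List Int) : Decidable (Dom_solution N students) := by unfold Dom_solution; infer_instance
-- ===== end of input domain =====

-- B replaces A's harmonic multiples sieve (for every team size scan all its multiples in the
-- participant array) by the inverted traversal: a frequency dict and trial-division divisor
-- enumeration up to sqrt per distinct value (objective: alternative; return value only, no mutation).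

-- ===== PORT A =====
def solution (N : Int) (students : List Int) : Int :=
  match PySem.List.max? students (fun x => x) with
  | none => 0  -- Python: max([]) raises ValueError (excluded by Pre_)
  | some MAXD =>
    let participant : List Int := (PySem.List.pyRange 0 (MAXD + 1)).map (fun _ => (0 : Int))
    let participant := students.foldl (fun (p : List Int) stud =>
      match PySem.List.pyGet? p stud with
      | some x => PySem.List.pySetD p stud (x + 1)
      | none => p  -- Python: IndexError (excluded by Pre_)
      ) participant
    (PySem.List.pyRange 1 (MAXD + 1)).foldl (fun result i =>
      let cnt := (PySem.List.pyRange 1 (PySem.Int.floordiv MAXD i + 1)).foldl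
        (fun cnt j => cnt + PySem.List.pyGetD participant (i * j) 0) 0
      if cnt ≥ 2 then max result (i * cnt) else result) 0

-- ===== PORT B =====
-- the body of Source B's 'while d * d <= v' loop: record d and v//d as divisors of v
def bumpDivisor (v c d : Int) (count : List Int) : List Int :=
  if PySem.Int.mod v d = 0 then
    let count' := PySem.List.pySetD count d (PySem.List.pyGetD count d 0 + c)
    let q := PySem.Int.floordiv v d
    if q ≠ d then PySem.List.pySetD count' q (PySem.List.pyGetD count' q 0 + c) else count'
  else count

-- the 'while d * d <= v' divisor-enumeration loop of Source B
def divLoop (v c : Int) (d : Int) (count : List Int) : List Int :=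
  if _h : d * d ≤ v then divLoop v c (d + 1) (bumpDivisor v c d count)
  else count
termination_by (v - d + 1).toNat
decreasing_by
  have hdv : d ≤ v := le_trans (by nlinarith [sq_nonneg (d - 1)]) _h
  omega

def solution_alt (N : Int) (students : List Int) : Int :=
  match PySem.List.max? students (fun x => x) with
  | none => 0  -- Python: max([]) raises ValueError (excluded by Pre_)
  | some MAXD =>
    let freq := students.foldl (fun d s => d.insert s (d.getD s 0 + 1)) PySem.Dict.empty
    let count := PySem.List.pyRepeat [(0 : Int)] (MAXD + 1)
    let count := freq.items.foldl (fun cnt p => divLoop p.1 p.2 1 cnt) count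
    (PySem.List.pyRange 1 (MAXD + 1)).foldl (fun result d =>
      if PySem.List.pyGetD count d 0 ≥ 2 then max result (d * PySem.List.pyGetD count d 0)
      else result) 0

-- ===== PRECONDITION & SPEC =====
-- Pre_ restricts to the task's natural domain (a non-empty list of nonnegative student counts):
-- outside it A raises (ValueError on [], IndexError on s < -(max+1)) or silently counts a negative
-- value into the array via Python's negative-index wraparound, an artefact of A's implementation.
def Pre_solution (N : Int) (students : List Int) : Prop :=
  students ≠ [] ∧ ∀ s ∈ students, 0 ≤ s
instance (N : Int) (students : List Int) : Decidable (Pre_solution N students) := by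
  unfold Pre_solution; infer_instance

def pvWitness_solution : Int × List Int := (5, [1, 2, 2, 4])

def Spec_solution (N : Int) (students : List Int) (out : Int) : Prop := out = solution_alt N students
instance (N : Int) (students : List Int) (out : Int) : Decidable (Spec_solution N students out) := by unfold Spec_solution; infer_instance

-- ===== CLAIM (what is proved, stated in full; the proofs are below) =====
def Claim_equal_solution : Prop := ∀ (N : Int) (students : List Int), Dom_solution N students → Pre_solution N students → Spec_solution N students (solution N students)

-- ===== LEMMAS AND PROOFS =====

-- the common reference count: the number of students s with 1 ≤ s and i ∣ s
def refCnt (students : List Int) (i : Int) : Int :=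
  (students.countP (fun s => decide (1 ≤ s) && decide (i ∣ s)) : Nat)

theorem pyGetD_nonneg (xs : List Int) (i : Int) (h : 0 ≤ i) (d : Int) :
    PySem.List.pyGetD xs i d = xs.getD i.toNat d := by
  rw [← Int.toNat_of_nonneg h, PySem.List.pyGetD_natCast]; rfl

theorem floordiv_pos (a b : Int) (h : 1 ≤ b) : PySem.Int.floordiv a b = a / b := by
  unfold PySem.Int.floordiv
  rw [Int.fdiv_eq_ediv_of_nonneg]; omega

theorem mod_pos (a b : Int) (h : 1 ≤ b) : PySem.Int.mod a b = a % b := by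
  unfold PySem.Int.mod
  rw [Int.fmod_eq_emod]; omega

theorem getD_zero_map (M : Int) (k : Int) (hk : 0 ≤ k) :
    PySem.List.pyGetD ((PySem.List.pyRange 0 (M + 1)).map (fun _ => (0 : Int))) k 0 = 0 := by
  rw [pyGetD_nonneg _ _ hk]
  rw [List.map_const']
  cases Nat.lt_or_ge k.toNat ((PySem.List.pyRange 0 (M+1)).length) with
  | inl h => rw [List.getD_eq_getElem _ _ (by simpa using h)]; simp
  | inr h => rw [List.getD_eq_default _ _ (by simpa using h)]

theorem zeros_length (M : Int) :
    (((PySem.List.pyRange 0 (M + 1)).map (fun _ => (0 : Int))).length : Int) = max (M + 1) 0 := by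
  simp [PySem.List.length_pyRange_one]

-- A's counting pass: participant[k] ends as the multiplicity of k among the students
theorem build_spec (M : Int) (l : List Int) (hl : ∀ s ∈ l, 0 ≤ s ∧ s ≤ M) :
    ∀ (p : List Int), (p.length : Int) = M + 1 →
    (((l.foldl (fun (p : List Int) stud =>
        match PySem.List.pyGet? p stud with
        | some x => PySem.List.pySetD p stud (x + 1)
        | none => p) p).length : Int) = M + 1 ∧
     ∀ k : Int, 0 ≤ k →
       PySem.List.pyGetD (l.foldl (fun (p : List Int) stud =>
        match PySem.List.pyGet? p stud with
        | some x => PySem.List.pySetD p stud (x + 1)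
        | none => p) p) k 0 = PySem.List.pyGetD p k 0 + (l.count k : Int)) := by
  induction l with
  | nil => intro p hp; exact ⟨hp, by simp⟩
  | cons s t ih =>
    intro p hp
    obtain ⟨hs0, hsM⟩ := hl s (List.mem_cons_self)
    have hrange : s.toNat < p.length := by omega
    have hget : PySem.List.pyGet? p s = some (p[s.toNat]) :=
      PySem.List.pyGet?_eq_some_getElem p hs0 (by omega)
    have hstep : (match PySem.List.pyGet? p s with
        | some x => PySem.List.pySetD p s (x + 1)
        | none => p) = PySem.List.pySetD p s (p[s.toNat] + 1) := by
      simp only [hget]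
    have hlen' : ((PySem.List.pySetD p s (p[s.toNat] + 1)).length : Int) = M + 1 := by
      rw [PySem.List.length_pySetD]; exact hp
    obtain ⟨ihlen, ihget⟩ := ih (fun x hx => hl x (List.mem_cons_of_mem _ hx)) _ hlen'
    rw [List.foldl_cons, hstep]
    refine ⟨ihlen, fun k hk => ?_⟩
    rw [ihget k hk]
    have hset : ∀ v : Int, PySem.List.pyGetD (PySem.List.pySetD p s v) k 0
        = if k.toNat = s.toNat then v else PySem.List.pyGetD p k 0 := by
      intro v
      have h2 := PySem.List.pyGetD_pySetD_natCast p s.toNat k.toNat v 0 hrange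
      rwa [Int.toNat_of_nonneg hs0, Int.toNat_of_nonneg hk] at h2
    rw [hset _]
    by_cases hks : k = s
    · subst hks
      rw [if_pos rfl, List.count_cons]
      have hpg : PySem.List.pyGetD p k 0 = p[k.toNat] := by
        rw [pyGetD_nonneg _ _ hk]; exact List.getD_eq_getElem p 0 hrange
      have hkk : (k == k) = true := by simp
      rw [hkk, if_pos rfl, hpg]
      push_cast
      omega
    · rw [if_neg (by omega), List.count_cons]
      have hsk : (s == k) = false := by simpa using fun h => hks h.symm
      rw [hsk]
      push_cast
      omega

-- a team size i finds exactly one multiple-slot per divisible student value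
theorem countP_eq_indicator (i K x : Int) (hi : 1 ≤ i) (hx : 0 ≤ x) (hup : x / i ≤ K) :
    ((PySem.List.pyRange 1 (K + 1)).countP (fun j => decide (i * j = x)) : Int)
      = if (decide (1 ≤ x) && decide (i ∣ x)) = true then 1 else 0 := by
  by_cases hdvd : i ∣ x
  · by_cases hx1 : 1 ≤ x
    · have hxi : i * (x / i) = x := Int.mul_ediv_cancel' hdvd
      have hpe : ∀ j ∈ PySem.List.pyRange 1 (K + 1),
          (decide (i * j = x) = true) ↔ ((j == x / i) = true) := by
        intro j _
        constructor
        · intro h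
          have h' : i * j = x := of_decide_eq_true h
          have : j = x / i := by rw [← h', Int.mul_ediv_cancel_left j (by omega)]
          simpa using this
        · intro h
          have : j = x / i := by simpa using h
          subst this
          simpa using hxi
      rw [List.countP_congr hpe]
      have hcnt : (PySem.List.pyRange 1 (K + 1)).countP (fun j => j == x / i)
          = (PySem.List.pyRange 1 (K + 1)).count (x / i) := (List.count_eq_countP ..).symm
      rw [hcnt]
      have hmem : x / i ∈ PySem.List.pyRange 1 (K + 1) := by
        rw [PySem.List.mem_pyRange_one]
        constructor
        · rw [Int.le_ediv_iff_mul_le (by omega)]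
          have := Int.le_of_dvd (by omega) hdvd
          omega
        · omega
      rw [List.count_eq_one_of_mem (PySem.List.nodup_pyRange_one 1 (K + 1)) hmem]
      simp [hx1, hdvd]
    · have : ∀ j ∈ PySem.List.pyRange 1 (K + 1), ¬ (decide (i * j = x) = true) := by
        intro j hj
        rw [PySem.List.mem_pyRange_one] at hj
        simp only [decide_eq_true_eq]
        intro h
        nlinarith [hj.1]
      rw [List.countP_eq_zero.mpr this]
      simp [hx1]
  · have : ∀ j ∈ PySem.List.pyRange 1 (K + 1), ¬ (decide (i * j = x) = true) := by
      intro j _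
      simp only [decide_eq_true_eq]
      intro h
      exact hdvd ⟨j, h.symm⟩
    rw [List.countP_eq_zero.mpr this]
    simp [hdvd]

-- the harmonic inner loop's sum of multiplicities is the reference count
theorem sum_counts (i K : Int) (hi : 1 ≤ i) (t : List Int) :
    (∀ s ∈ t, 0 ≤ s ∧ s / i ≤ K) →
    ((PySem.List.pyRange 1 (K + 1)).map (fun j => (t.count (i * j) : Int))).sum
      = refCnt t i := by
  induction t with
  | nil => simp [refCnt]
  | cons x t ih =>
    intro hb
    obtain ⟨hx0, hxK⟩ := hb x List.mem_cons_self
    have key : ∀ j ∈ PySem.List.pyRange 1 (K + 1),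
        ((List.count (i * j) (x :: t) : Nat) : Int)
          = ((List.count (i * j) t : Nat) : Int)
            + (if (fun j => decide (i * j = x)) j = true then (1 : Int) else 0) := by
      intro j _
      rw [List.count_cons]
      by_cases h : i * j = x
      · have hxx : (x == i * j) = true := by simpa using h.symm
        rw [hxx]
        push_cast
        simp [h]
      · have hxx : (x == i * j) = false := by simpa using fun hh => h hh.symm
        rw [hxx]
        push_cast
        simp [h]
    rw [List.map_congr_left key, PySem.List.sum_map_add_int,
        ih (fun s hs => hb s (List.mem_cons_of_mem _ hs)),
        PySem.List.sum_map_ite_one_zero, countP_eq_indicator i K x hi hx0 hxK]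
    unfold refCnt
    rw [List.countP_cons]
    by_cases hpx : (decide (1 ≤ x) && decide (i ∣ x)) = true
    · rw [if_pos hpx, if_pos hpx]; push_cast; ring
    · rw [if_neg hpx, if_neg hpx]; push_cast; ring

theorem cntA_eq (M : Int) (students : List Int) (hb : ∀ s ∈ students, 0 ≤ s ∧ s ≤ M)
    (hM : 0 ≤ M) (i : Int) (hi : 1 ≤ i) :
    (PySem.List.pyRange 1 (PySem.Int.floordiv M i + 1)).foldl
      (fun cnt j => cnt + PySem.List.pyGetD
        (students.foldl (fun (p : List Int) stud =>
          match PySem.List.pyGet? p stud with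
          | some x => PySem.List.pySetD p stud (x + 1)
          | none => p) ((PySem.List.pyRange 0 (M + 1)).map (fun _ => (0 : Int)))) (i * j) 0) 0
      = refCnt students i := by
  have hlen0 : ((((PySem.List.pyRange 0 (M + 1)).map (fun _ => (0 : Int)))).length : Int) = M + 1 := by
    rw [zeros_length]; omega
  obtain ⟨hlen, hget⟩ := build_spec M students hb _ hlen0
  rw [PySem.List.foldl_add, floordiv_pos M i hi]
  rw [List.map_congr_left (g := fun j => ((students.count (i * j) : Nat) : Int))
    (fun j hj => by
      have hj1 : 1 ≤ j := (PySem.List.mem_pyRange_one.mp hj).1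
      have hij : 0 ≤ i * j := by nlinarith
      rw [hget _ hij, getD_zero_map M _ hij, zero_add])]
  rw [sum_counts i (M / i) hi students
    (fun s hs => ⟨(hb s hs).1, Int.ediv_le_ediv (by omega) (hb s hs).2⟩)]
  ring

theorem length_bump (v c d : Int) (cnt : List Int) :
    (bumpDivisor v c d cnt).length = cnt.length := by
  by_cases h1 : PySem.Int.mod v d = 0
  · by_cases h2 : PySem.Int.floordiv v d ≠ d
    · simp [bumpDivisor, h1, h2, PySem.List.length_pySetD]
    · simp [bumpDivisor, h1, h2, PySem.List.length_pySetD]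
  · simp [bumpDivisor, h1]

theorem length_divLoop (v c : Int) : ∀ (d : Int) (cnt : List Int),
    ((divLoop v c d cnt).length) = cnt.length := by
  intro d cnt
  induction d, cnt using divLoop.induct v c with
  | case1 d cnt h ih => rw [divLoop, dif_pos h, ih, length_bump]
  | case2 d cnt h => rw [divLoop, dif_neg h]

theorem getD_setD (l : List Int) (a k w : Int) (ha : 0 ≤ a) (hal : a < (l.length : Int))
    (hk : 0 ≤ k) :
    PySem.List.pyGetD (PySem.List.pySetD l a w) k 0
      = if k = a then w else PySem.List.pyGetD l k 0 := by
  have h2 := PySem.List.pyGetD_pySetD_natCast l a.toNat k.toNat w 0 (by omega)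
  rw [Int.toNat_of_nonneg ha, Int.toNat_of_nonneg hk] at h2
  rw [h2]
  by_cases hka : k = a
  · rw [if_pos (by omega), if_pos hka]
  · rw [if_neg (by omega), if_neg hka]

-- the sqrt divisor-enumeration loop bumps every divisor of v exactly once
theorem divLoop_getD (v c : Int) (hv : 1 ≤ v) : ∀ (d : Int) (cnt : List Int),
    1 ≤ d → v < (cnt.length : Int) → ∀ (k : Int), 0 ≤ k →
    PySem.List.pyGetD (divLoop v c d cnt) k 0
      = PySem.List.pyGetD cnt k 0
        + (if k ∣ v ∧ 1 ≤ k ∧ d ≤ k ∧ d ≤ v / k then c else 0) := by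
  intro d cnt
  induction d, cnt using divLoop.induct v c with
  | case2 d cnt h =>
    intro hd hlen k hk
    rw [divLoop, dif_neg h, if_neg, add_zero]
    rintro ⟨hkdvd, hk1, hdk, hdvk⟩
    have hvk : k * (v / k) = v := Int.mul_ediv_cancel' hkdvd
    nlinarith
  | case1 d cnt h ih =>
    intro hd hlen k hk
    have hdv : d ≤ v := by nlinarith
    have hlen1 : v < ((bumpDivisor v c d cnt).length : Int) := by
      rw [length_bump]; exact hlen
    rw [divLoop, dif_pos h, ih (by omega) hlen1 k hk]
    have hmodiff : (PySem.Int.mod v d = 0) ↔ d ∣ v := by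
      rw [mod_pos v d hd]
      exact ⟨Int.dvd_of_emod_eq_zero, Int.emod_eq_zero_of_dvd⟩
    by_cases hdd : d ∣ v
    · have hfd : PySem.Int.floordiv v d = v / d := floordiv_pos v d hd
      set q := v / d with hqdef
      have hdq' : d * q = v := Int.mul_ediv_cancel' hdd
      have hq1 : 1 ≤ q := by rw [hqdef, Int.le_ediv_iff_mul_le (by omega)]; omega
      have hdq : d ≤ q := by rw [hqdef, Int.le_ediv_iff_mul_le (by omega)]; exact h
      have hqv : q ≤ v := by nlinarith
      have hqdvd : q ∣ v := ⟨d, by rw [← hdq', mul_comm]⟩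
      have hvq : v / q = d := by rw [← hdq', Int.mul_ediv_cancel d (by omega)]
      have hcnt1 : bumpDivisor v c d cnt = if q ≠ d
          then PySem.List.pySetD (PySem.List.pySetD cnt d (PySem.List.pyGetD cnt d 0 + c)) q
            (PySem.List.pyGetD (PySem.List.pySetD cnt d (PySem.List.pyGetD cnt d 0 + c)) q 0 + c)
          else PySem.List.pySetD cnt d (PySem.List.pyGetD cnt d 0 + c) := by
        simp only [bumpDivisor, if_pos (hmodiff.mpr hdd), hfd]
      by_cases hqd : q = d
      · -- v = d * d: only the single bump at d
        rw [hcnt1, if_neg (by omega)]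
        rw [getD_setD cnt d k _ (by omega) (by omega) hk]
        by_cases hkd : k = d
        · subst hkd
          rw [if_pos rfl, if_neg (by omega), if_pos ⟨hdd, by omega, le_refl k, by omega⟩]
          ring
        · rw [if_neg hkd]
          by_cases hkv : k ∣ v ∧ 1 ≤ k
          · have hvkk : k * (v / k) = v := Int.mul_ediv_cancel' hkv.1
            have hvkd : v / k ≠ d := by
              intro hh
              rw [hh] at hvkk
              have : v / d = k := by rw [← hvkk, Int.mul_ediv_cancel k (by omega)]
              omega
            by_cases hcd : d ≤ k ∧ d ≤ v / k
            · rw [if_pos ⟨hkv.1, hkv.2, by omega, by omega⟩,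
                  if_pos ⟨hkv.1, hkv.2, hcd.1, hcd.2⟩]
            · rw [if_neg (by rintro ⟨_, _, h1, h2⟩; exact hcd ⟨by omega, by omega⟩),
                  if_neg (by rintro ⟨_, _, h1, h2⟩; exact hcd ⟨h1, h2⟩)]
          · rw [if_neg (by rintro ⟨h1, _, h2, _⟩; exact hkv ⟨h1, by omega⟩),
                if_neg (by rintro ⟨h1, h2, _, _⟩; exact hkv ⟨h1, h2⟩)]
      · -- two distinct bumps, at d and at q
        rw [hcnt1, if_pos hqd]
        rw [getD_setD _ q k _ (by omega) (by rw [PySem.List.length_pySetD]; omega) hk,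
            getD_setD _ d q _ (by omega) (by omega) (by omega),
            getD_setD _ d k _ (by omega) (by omega) hk]
        rw [if_neg hqd]
        by_cases hkq : k = q
        · subst hkq
          rw [if_pos rfl, if_neg (by omega), if_pos ⟨hqdvd, by omega, hdq, by omega⟩]
          ring
        · rw [if_neg hkq]
          by_cases hkd : k = d
          · subst hkd
            rw [if_pos rfl, if_neg (by omega), if_pos ⟨hdd, by omega, le_refl k, by omega⟩]
            ring
          · rw [if_neg hkd]
            by_cases hkv : k ∣ v ∧ 1 ≤ k
            · have hvkk : k * (v / k) = v := Int.mul_ediv_cancel' hkv.1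
              have hvkd : v / k ≠ d := by
                intro hh
                rw [hh] at hvkk
                have : v / d = k := by rw [← hvkk, Int.mul_ediv_cancel k (by omega)]
                omega
              by_cases hcd : d ≤ k ∧ d ≤ v / k
              · rw [if_pos ⟨hkv.1, hkv.2, by omega, by omega⟩,
                    if_pos ⟨hkv.1, hkv.2, hcd.1, hcd.2⟩]
              · rw [if_neg (by rintro ⟨_, _, h1, h2⟩; exact hcd ⟨by omega, by omega⟩),
                    if_neg (by rintro ⟨_, _, h1, h2⟩; exact hcd ⟨by omega, by omega⟩)]
            · rw [if_neg (by tauto), if_neg (by tauto)]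
    · have hcnt1 : bumpDivisor v c d cnt = cnt := by
        simp only [bumpDivisor, if_neg (fun hh => hdd (hmodiff.mp hh))]
      rw [hcnt1]
      by_cases hkv : k ∣ v ∧ 1 ≤ k
      · have hvkk : k * (v / k) = v := Int.mul_ediv_cancel' hkv.1
        have hkd : k ≠ d := fun hh => hdd (hh ▸ hkv.1)
        have hvkd : v / k ≠ d := by
          intro hh
          exact hdd ⟨k, by rw [← hvkk, hh, mul_comm]⟩
        by_cases hcd : d ≤ k ∧ d ≤ v / k
        · rw [if_pos ⟨hkv.1, hkv.2, by omega, by omega⟩,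
              if_pos ⟨hkv.1, hkv.2, hcd.1, hcd.2⟩]
        · rw [if_neg (by rintro ⟨_, _, h1, h2⟩; exact hcd ⟨by omega, by omega⟩),
              if_neg (by rintro ⟨_, _, h1, h2⟩; exact hcd ⟨by omega, by omega⟩)]
      · rw [if_neg (by tauto), if_neg (by tauto)]

theorem foldB (M : Int) (l : List (Int × Int)) :
    ∀ (cnt : List Int), (cnt.length : Int) = M + 1 → (∀ p ∈ l, 0 ≤ p.1 ∧ p.1 ≤ M) →
    ((l.foldl (fun c p => divLoop p.1 p.2 1 c) cnt).length : Int) = M + 1 ∧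
    ∀ k : Int, 0 ≤ k →
    PySem.List.pyGetD (l.foldl (fun c p => divLoop p.1 p.2 1 c) cnt) k 0
      = PySem.List.pyGetD cnt k 0
        + (l.map (fun p => if k ∣ p.1 ∧ 1 ≤ k ∧ 1 ≤ p.1 then p.2 else 0)).sum := by
  induction l with
  | nil => intro cnt hlen _; exact ⟨hlen, by simp⟩
  | cons p t ih =>
    intro cnt hlen hb
    obtain ⟨hp0, hpM⟩ := hb p List.mem_cons_self
    have hlen1 : ((divLoop p.1 p.2 1 cnt).length : Int) = M + 1 := by
      rw [length_divLoop]; exact hlen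
    obtain ⟨ihlen, ihget⟩ := ih _ hlen1 (fun x hx => hb x (List.mem_cons_of_mem _ hx))
    rw [List.foldl_cons]
    refine ⟨ihlen, fun k hk => ?_⟩
    rw [ihget k hk, List.map_cons, List.sum_cons]
    by_cases hv1 : 1 ≤ p.1
    · rw [divLoop_getD p.1 p.2 hv1 1 cnt (by omega) (by omega) k hk]
      have hiff : (k ∣ p.1 ∧ 1 ≤ k ∧ 1 ≤ k ∧ 1 ≤ p.1 / k) ↔ (k ∣ p.1 ∧ 1 ≤ k ∧ 1 ≤ p.1) := by
        constructor
        · rintro ⟨h1, h2, _, _⟩; exact ⟨h1, h2, hv1⟩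
        · rintro ⟨h1, h2, _⟩
          refine ⟨h1, h2, h2, ?_⟩
          rw [Int.le_ediv_iff_mul_le (by omega)]
          have := Int.le_of_dvd (by omega) h1
          omega
      by_cases hc : k ∣ p.1 ∧ 1 ≤ k ∧ 1 ≤ p.1
      · rw [if_pos (hiff.mpr hc), if_pos hc]; ring
      · rw [if_neg (fun hh => hc (hiff.mp hh)), if_neg hc]; ring
    · have hz : divLoop p.1 p.2 1 cnt = cnt := by
        rw [divLoop, dif_neg (by omega)]
      rw [hz, if_neg (by tauto)]
      ring

-- summing multiplicity over the distinct values is counting over the list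
theorem sum_over_nodup (ds : List Int) (p : Int → Bool) (hnd : ds.Nodup) :
    ∀ (xs : List Int), (∀ x ∈ xs, p x = true → x ∈ ds) →
    (ds.map (fun u => if p u = true then ((xs.count u : Nat) : Int) else 0)).sum
      = ((xs.countP p : Nat) : Int) := by
  intro xs
  induction xs with
  | nil => intro _; simp
  | cons x t ih =>
    intro hcov
    have key : ∀ u ∈ ds,
        (if p u = true then ((List.count u (x :: t) : Nat) : Int) else 0)
          = (if p u = true then ((List.count u t : Nat) : Int) else 0)
            + (if (fun u => p u && (u == x)) u = true then (1 : Int) else 0) := by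
      intro u _
      by_cases hpu : p u = true
      · rw [if_pos hpu, if_pos hpu, List.count_cons]
        by_cases hux : u = x
        · rw [if_pos (show (x == u) = true by simp [hux]),
              if_pos (show ((fun u => p u && (u == x)) u) = true by simp only []; rw [hux] at hpu ⊢; simp [hpu])]
          push_cast
          ring
        · rw [if_neg (show ¬ (x == u) = true by simpa using fun hh => hux hh.symm),
              if_neg (show ¬ ((fun u => p u && (u == x)) u) = true by simp [hux])]
          push_cast
          ring
      · rw [if_neg hpu, if_neg hpu]
        rw [if_neg (show ¬ ((fun u => p u && (u == x)) u) = true by simp [hpu])]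
        simp
    rw [List.map_congr_left key, PySem.List.sum_map_add_int,
        ih (fun y hy hpy => hcov y (List.mem_cons_of_mem _ hy) hpy),
        PySem.List.sum_map_ite_one_zero, List.countP_cons]
    have hcnt : (ds.countP (fun u => p u && (u == x)) : Int)
        = if p x = true then 1 else 0 := by
      by_cases hpx : p x = true
      · have he : ∀ u ∈ ds, ((fun u => p u && (u == x)) u = true) ↔ ((u == x) = true) := by
          intro u _
          constructor
          · intro hh; exact Bool.and_elim_right hh
          · intro hh
            have : u = x := by simpa using hh
            subst this
            simp [hpx]
        rw [List.countP_congr he, ← List.count_eq_countP,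
            List.count_eq_one_of_mem hnd (hcov x List.mem_cons_self hpx), if_pos hpx]
        norm_num
      · have he : ∀ u ∈ ds, ¬ ((fun u => p u && (u == x)) u = true) := by
          intro u _ hh
          have h1 := Bool.and_elim_left hh
          have h2 := Bool.and_elim_right hh
          have : u = x := by simpa using h2
          subst this
          exact hpx h1
        rw [List.countP_eq_zero.mpr he, if_neg hpx]
        simp
    rw [hcnt]
    by_cases hpx : p x = true
    · rw [if_pos hpx, if_pos hpx]; push_cast; ring
    · rw [if_neg hpx, if_neg hpx]; push_cast; ring

theorem getD_repl (n : Nat) (k : Int) (hk : 0 ≤ k) :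
    PySem.List.pyGetD (List.replicate n (0 : Int)) k 0 = 0 := by
  rw [pyGetD_nonneg _ _ hk]
  by_cases h : k.toNat < n
  · exact List.getD_replicate 0 h
  · rw [List.getD_eq_default _ _ (by simpa using h)]

theorem cntB_eq (M : Int) (students : List Int) (hM : 0 ≤ M)
    (hb : ∀ s ∈ students, 0 ≤ s ∧ s ≤ M) (k : Int) (hk : 1 ≤ k) :
    PySem.List.pyGetD
      ((students.foldl (fun d s => d.insert s (d.getD s 0 + 1)) PySem.Dict.empty).items.foldl
        (fun cnt p => divLoop p.1 p.2 1 cnt) (PySem.List.pyRepeat [(0 : Int)] (M + 1))) k 0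
      = refCnt students k := by
  rw [PySem.Dict.foldl_insert_getD_add_one_eq_counter, PySem.Dict.items_counter,
      PySem.List.pyRepeat_singleton]
  have hlen0 : ((List.replicate (M + 1).toNat (0 : Int)).length : Int) = M + 1 := by
    simp; omega
  obtain ⟨_, hget⟩ := foldB M ((PySem.Set.ofList students).map (fun u => (u, ((students.count u : Nat) : Int))))
    _ hlen0 (by
      intro p hp
      obtain ⟨u, hu, rfl⟩ := List.mem_map.mp hp
      exact hb u ((PySem.Set.mem_ofList students u).mp hu))
  rw [hget k (by omega), getD_repl _ k (by omega), zero_add, List.map_map]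
  have hcong : ∀ u ∈ PySem.Set.ofList students,
      (((fun p => if k ∣ p.1 ∧ 1 ≤ k ∧ 1 ≤ p.1 then p.2 else 0) ∘
        (fun u => (u, ((students.count u : Nat) : Int)))) u)
        = (fun u => if (fun s => decide (1 ≤ s) && decide (k ∣ s)) u = true
            then ((students.count u : Nat) : Int) else 0) u := by
    intro u _
    simp only [Function.comp_apply]
    by_cases hc : k ∣ u ∧ 1 ≤ u
    · rw [if_pos ⟨hc.1, hk, hc.2⟩, if_pos (by simp [hc.1, hc.2])]
    · rw [if_neg (by tauto), if_neg (by simpa using fun h1 h2 => hc ⟨h2, h1⟩)]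
  rw [List.map_congr_left hcong,
      sum_over_nodup _ _ (PySem.Set.nodup_ofList students) students
        (fun x hx _ => (PySem.Set.mem_ofList students x).mpr hx)]
  rfl

-- ===== VERDICT (by name: the statement is the Claim_ definition above) =====
theorem solution_spec : Claim_equal_solution := by
  intro N students _ hpre
  obtain ⟨hne, hpos⟩ := hpre
  unfold Spec_solution
  cases hmax : PySem.List.max? students (fun x => x) with
  | none => exact absurd ((PySem.List.max?_eq_none_iff students _).mp hmax) hne
  | some M =>
    have hM0 : 0 ≤ M := hpos M (PySem.List.max?_mem hmax)
    have hb : ∀ s ∈ students, 0 ≤ s ∧ s ≤ M :=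
      fun s hs => ⟨hpos s hs, PySem.List.max?_isMax hmax s hs⟩
    simp only [solution, solution_alt, hmax]
    refine PySem.List.foldl_congr_mem _ _ _ _ (fun acc i hi => ?_)
    rw [PySem.List.mem_pyRange_one] at hi
    rw [cntA_eq M students hb hM0 i (by omega), cntB_eq M students hM0 hb i (by omega)]
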